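-- pv_equiv track=rewrite | github.com/Lilyan-code/PTA-Tutorial | 浙大版《Python 程序设计》题目集/Function/第6章函数-6 缩写词.py | acronym
-- ===== SOURCE A (Python) =====
-- def acronym(phrase):
--     s = []
--     s = phrase.split(' ')
--
--     t = []
--     for i in range(len(s)):
--         if (s[i] != ''):
--             t.append(s[i][0:1])
--     ans = ''
--     for i in range(len(t)):
--         ans += t[i].upper()
--     return ans
-- ===== SOURCE B (Python) =====
-- def acronym(phrase):
--     ans = []
--     prev = ' '
--     for ch in phrase:
--         if prev == ' ' and ch != ' ':
--             ans.append(ch.upper())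
--         prev = ch
--     return ''.join(ans)
-- ===== Notes on version B (the rewrite author's own statement) =====
-- stated objective: alternative
-- what changed: Single pass over the characters emitting the upper-cased char at each word start (previous char is a separator, current is not), instead of materializing the split list, a first-slice list and a second concatenation loop.
import Mathlib
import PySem

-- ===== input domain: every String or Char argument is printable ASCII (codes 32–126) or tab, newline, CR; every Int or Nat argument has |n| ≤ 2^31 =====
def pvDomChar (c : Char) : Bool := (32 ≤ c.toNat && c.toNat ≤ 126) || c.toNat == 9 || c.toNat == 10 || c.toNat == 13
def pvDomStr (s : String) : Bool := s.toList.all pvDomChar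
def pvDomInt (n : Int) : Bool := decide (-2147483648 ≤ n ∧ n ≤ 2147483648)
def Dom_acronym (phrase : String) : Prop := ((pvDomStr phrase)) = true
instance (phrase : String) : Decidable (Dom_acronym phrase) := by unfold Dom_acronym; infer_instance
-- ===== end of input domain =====

-- B replaces A's split(' ')/slice/concat pipeline by one pass that emits the upper-cased
-- character at each word start (previous char is ' ', current is not); same return value.

-- ===== PORT A =====
-- s = phrase.split(' '); t collects s[i][0:1] for nonempty chunks; ans concatenates t[i].upper()
def acronym (phrase : String) : String :=
  let s := PySem.Chars.splitOn phrase.toList [' ']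
  let t := s.foldl (fun t si => if si ≠ [] then t ++ [PySem.Chars.slice si (some 0) (some 1)] else t)
    ([] : List (List Char))
  String.mk (t.foldl (fun ans ti => ans ++ PySem.Chars.upper ti) [])

-- ===== PORT B =====
-- prev starts as ' '; for each ch, append ch.upper() when prev == ' ' and ch != ' '; join at the end
def acronym_alt (phrase : String) : String :=
  String.mk ((phrase.toList.foldl
    (fun (st : Char × List Char) ch =>
      (ch, if st.1 = ' ' ∧ ch ≠ ' ' then st.2 ++ [PySem.Chars.upperChar ch] else st.2))
    (' ', ([] : List Char))).2)

-- ===== PRECONDITION & SPEC =====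
def Spec_acronym (phrase : String) (out : String) : Prop := out = acronym_alt phrase
instance (phrase : String) (out : String) : Decidable (Spec_acronym phrase out) := by unfold Spec_acronym; infer_instance

-- ===== CLAIM (what is proved, stated in full; the proofs are below) =====
def Claim_equal_acronym : Prop := ∀ (phrase : String), Dom_acronym phrase → Spec_acronym phrase (acronym phrase)

-- ===== LEMMAS AND PROOFS =====

-- simple recursive form of split on a single literal space
def split1 : List Char → List (List Char)
  | [] => [[]]
  | c :: rest =>
      if c = ' ' then [] :: split1 rest
      else
        match split1 rest with
        | [] => [[c]]      -- unreachable
        | h :: t => (c :: h) :: t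

-- what A computes from the chunk list: upper of the first-char slice of each nonempty chunk
def acrOf : List (List Char) → List Char
  | [] => []
  | w :: ws =>
      if w = [] then acrOf ws
      else PySem.Chars.upper (PySem.Chars.slice w (some 0) (some 1)) ++ acrOf ws

-- what B emits from state prev over the remaining characters
def emit : Char → List Char → List Char
  | _, [] => []
  | prev, c :: rest =>
      if prev = ' ' ∧ c ≠ ' ' then PySem.Chars.upperChar c :: emit c rest else emit c rest

theorem split1_ne_nil (l : List Char) : split1 l ≠ [] := by
  cases l with
  | nil => simp [split1]
  | cons c rest =>
      simp only [split1]
      split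
      · simp
      · cases h : split1 rest <;> simp

theorem split1_space (rest : List Char) : split1 (' ' :: rest) = [] :: split1 rest := by
  simp [split1]

theorem go_space (l : List Char) : ∀ (fuel : Nat) (cur : List Char) (accs : List (List Char))
    (h : List Char) (ht : List (List Char)), l.length < fuel → split1 l = (h :: ht) →
    PySem.Chars.splitOn.go [' '] fuel l cur accs = accs.reverse ++ (cur.reverse ++ h) :: ht := by
  induction l with
  | nil =>
      intro fuel cur accs h ht hf hs
      simp only [split1] at hs
      injection hs with h1 h2
      subst h1; subst h2
      cases fuel with
      | zero => omega
      | succ f => simp [PySem.Chars.splitOn.go]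
  | cons c rest ih =>
      intro fuel cur accs h ht hf hs
      cases fuel with
      | zero => simp at hf
      | succ f =>
        rw [PySem.Chars.splitOn.go]
        by_cases hc : c = ' '
        · subst hc
          rw [split1_space] at hs
          cases hrest : split1 rest with
          | nil => exact absurd hrest (split1_ne_nil rest)
          | cons h' t' =>
            rw [hrest] at hs
            injection hs with h1 h2
            subst h1; subst h2
            have hpre : ([' '] : List Char).isPrefixOf (' ' :: rest) = true := by
              simp [List.isPrefixOf]
            rw [if_pos hpre]
            have hdrop : List.drop ([' '] : List Char).length (' ' :: rest) = rest := by simp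
            rw [hdrop]
            rw [ih f [] (cur.reverse :: accs) h' t' (by simpa using hf) hrest]
            simp
        · have e1 : split1 (c :: rest)
              = match split1 rest with | [] => [[c]] | h :: t => (c :: h) :: t := by
            simp [split1, hc]
          cases hrest : split1 rest with
          | nil => exact absurd hrest (split1_ne_nil rest)
          | cons h' t' =>
            rw [e1, hrest] at hs
            injection hs with h1 h2
            subst h1; subst h2
            have hpre : ([' '] : List Char).isPrefixOf (c :: rest) = false := by
              simp only [List.isPrefixOf, Bool.and_eq_false_iff]
              left
              simpa using fun h => hc h.symm
            rw [if_neg (by simp [hpre])]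
            rw [ih f (c :: cur) accs h' t' (by simpa using hf) hrest]
            simp

theorem splitOn_eq_split1 (l : List Char) : PySem.Chars.splitOn l [' '] = split1 l := by
  cases hrest : split1 l with
  | nil => exact absurd hrest (split1_ne_nil l)
  | cons h t =>
      unfold PySem.Chars.splitOn
      rw [go_space l (l.length + 1) [] [] h t (by omega) hrest]
      simp

theorem foldl_t (chunks : List (List Char)) (acc : List (List Char)) :
    chunks.foldl (fun t si => if si ≠ [] then t ++ [PySem.Chars.slice si (some 0) (some 1)] else t) acc
      = acc ++ (chunks.filter (· ≠ [])).map (fun si => PySem.Chars.slice si (some 0) (some 1)) := by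
  induction chunks generalizing acc with
  | nil => simp
  | cons w ws ih =>
      by_cases hw : w = []
      · subst hw
        rw [List.foldl_cons, if_neg (by simp), ih, List.filter_cons]
        simp
      · rw [List.foldl_cons, if_pos hw, ih, List.filter_cons]
        simp [hw]

theorem foldl_ans (ts : List (List Char)) (acc : List Char) :
    ts.foldl (fun ans ti => ans ++ PySem.Chars.upper ti) acc
      = acc ++ (ts.map PySem.Chars.upper).flatten := by
  induction ts generalizing acc with
  | nil => simp
  | cons w ws ih => simp [ih]

theorem acrOf_eq (chunks : List (List Char)) :
    (((chunks.filter (· ≠ [])).map (fun si => PySem.Chars.slice si (some 0) (some 1))).map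
      PySem.Chars.upper).flatten = acrOf chunks := by
  induction chunks with
  | nil => simp [acrOf]
  | cons w ws ih =>
      by_cases hw : w = []
      · subst hw
        simpa [acrOf] using ih
      · rw [List.filter_cons]
        simp only [ne_eq, hw, not_false_eq_true, decide_true, if_true, List.map_cons,
          List.flatten_cons, ih]
        simp only [acrOf, if_neg hw]

theorem slice01_cons (d : Char) (h : List Char) :
    PySem.Chars.slice (d :: h) (some 0) (some 1) = [d] := by
  rw [PySem.Chars.slice_eq_listSlice]
  simp only [PySem.List.slice_zero_start]
  rw [show (1 : Int) = ((1 : Nat) : Int) by simp, PySem.List.slice_to_natCast]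
  simp

theorem acrOf_split1 (l : List Char) :
    acrOf (split1 l) = emit ' ' l ∧ ∀ c, c ≠ ' ' → acrOf (split1 l).tail = emit c l := by
  induction l with
  | nil => simp [split1, acrOf, emit]
  | cons d rest ih =>
      by_cases hd : d = ' '
      · subst hd
        constructor
        · rw [split1_space]
          simp only [acrOf, if_true]
          rw [ih.1]
          simp [emit]
        · intro c hc
          rw [split1_space]
          simp only [List.tail_cons]
          rw [ih.1]
          simp [emit]
      · have e1 : split1 (d :: rest)
            = match split1 rest with | [] => [[d]] | h :: t => (d :: h) :: t := by
          simp [split1, hd]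
        cases hrest : split1 rest with
        | nil => exact absurd hrest (split1_ne_nil rest)
        | cons h t =>
          rw [hrest] at e1
          have htail : acrOf t = emit d rest := by
            have h2 := ih.2 d hd
            rw [hrest] at h2
            simpa using h2
          constructor
          · rw [e1]
            simp only [acrOf, if_neg (by simp : ¬ (d :: h : List Char) = [])]
            rw [htail, slice01_cons]
            simp [emit, hd, PySem.Chars.upper]
          · intro c hc
            rw [e1]
            simp only [List.tail_cons]
            have h3 : emit c (d :: rest) = emit d rest := by
              simp [emit, hc]
            rw [h3]
            exact htail

theorem foldl_emit (l : List Char) : ∀ (p : Char) (acc : List Char),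
    (l.foldl (fun (st : Char × List Char) ch =>
        (ch, if st.1 = ' ' ∧ ch ≠ ' ' then st.2 ++ [PySem.Chars.upperChar ch] else st.2))
      (p, acc)).2 = acc ++ emit p l := by
  induction l with
  | nil => intro p acc; simp [emit]
  | cons c rest ih =>
      intro p acc
      rw [List.foldl_cons]
      dsimp only
      by_cases h : p = ' ' ∧ c ≠ ' '
      · rw [if_pos h, ih]
        simp [emit, h]
      · rw [if_neg h, ih]
        simp [emit, h]

-- ===== VERDICT (by name: the statement is the Claim_ definition above) =====
theorem acronym_spec : Claim_equal_acronym := by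
  intro phrase _
  unfold Spec_acronym acronym acronym_alt
  rw [splitOn_eq_split1]
  dsimp only
  rw [foldl_t, foldl_ans, foldl_emit]
  simp only [List.nil_append]
  rw [acrOf_eq, (acrOf_split1 phrase.toList).1]
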